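-- pv_equiv track=rewrite | github.com/sakshar/rambler | scripts/from_clusters_to_assembly.py | get_assembly_for_all_rotations_of_a_cycle
-- ===== SOURCE A (Python) =====
-- def get_assembly_for_all_rotations_of_a_cycle(contig_map, ref_size, cycle, edges):
--     all_rotations = [cycle[:-1]]
--     for i in range(1, len(cycle) - 1):
--         all_rotations.append(cycle[:-1][i:]+cycle[:-1][:i])
--     cyclic_assemblies = []
--     cyclic_contigs_list = []
--     for current_rotation in all_rotations:
--         current_contigs = dict()
--         current_orientations = ""
--         current_contig = ""
--         current_contig_id = current_rotation[0]
--         current_dist = ref_size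
--         last_edge = ""
--         flag = False
--         for i in range(1, len(current_rotation)):
--             u, v = current_rotation[i-1], current_rotation[i]
--             current_orientations += edges[(u, v)][2]
--             # when merging the first edge on a path
--             if not flag:
--                 if edges[(u, v)][2] == "+":
--                     current_contig = str(contig_map[u][0]) + str(contig_map[v][0][edges[(u, v)][1][1]:])
--                     last_edge = "+"
--                 elif edges[(u, v)][2] == "-":
--                     current_contig = str(contig_map[u][1]) + str(contig_map[v][0][edges[(u, v)][1][1]:])
--                     last_edge = "-"
--                 elif edges[(u, v)][2] == "*":
--                     current_contig = str(contig_map[u][0]) + str(contig_map[v][1][edges[(u, v)][1][1]:])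
--                     last_edge = "*"
--                 current_contig_id += v
--                 flag = True
--             else:
--                 if edges[(u, v)][2] == "+":
--                     # handling "++", "-+": continue with the current contig
--                     if last_edge in ["+", "-"]:
--                         current_contig += str(contig_map[v][0][edges[(u, v)][1][1]:])
--                         current_contig_id += v
--                     # handling "*+": break the current one and start a new contig
--                     elif last_edge == "*":
--                         current_contigs[current_contig_id] = current_contig
--                         current_dist -= len(current_contig)
--                         current_contig = str(contig_map[v][0][edges[(u, v)][1][1]:])
--                         current_contig_id = v
--                     last_edge = "+"
--                 elif edges[(u, v)][2] == "-":
--                     # handling "+-", "--": break the current one and start a new contig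
--                     if last_edge in ["+", "-"]:
--                         current_contigs[current_contig_id] = current_contig
--                         current_dist -= len(current_contig)
--                         current_contig = str(contig_map[v][0][edges[(u, v)][1][1]:])
--                         current_contig_id = v
--                     # handling "*-": continue with the current contig
--                     elif last_edge == "*":
--                         current_contig += str(contig_map[v][0][edges[(u, v)][1][1]:])
--                         current_contig_id += v
--                     last_edge = "-"
--                 elif edges[(u, v)][2] == "*":
--                     # handling "+*", "-*": continue with the current contig
--                     if last_edge in ["+", "-"]:
--                         current_contig += str(contig_map[v][1][edges[(u, v)][1][1]:])
--                         current_contig_id += v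
--                     # handling "**": break the current one and start a new contig
--                     elif last_edge == "*":
--                         current_contigs[current_contig_id] = current_contig
--                         current_dist -= len(current_contig)
--                         current_contig = str(contig_map[v][1][edges[(u, v)][1][1]:])
--                         current_contig_id = v
--                     last_edge = "*"
--         if current_contig_id not in current_contigs.keys():
--             current_contigs[current_contig_id] = current_contig
--             current_dist -= len(current_contig)
--         cyclic_assemblies.append((current_contigs, current_dist, current_orientations))
--         cyclic_contigs_list += [list(current_contigs.keys())]
--     return cyclic_assemblies, all_rotations, cyclic_contigs_list
-- ===== SOURCE B (Python) =====
-- def get_assembly_for_all_rotations_of_a_cycle(contig_map, ref_size, cycle, edges):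
--     nodes = cycle[:-1]
--     n = len(nodes)
--     all_rotations = [nodes[i:] + nodes[:i] for i in range(max(1, n))]
--     # Precompute, once for the whole cycle, the data of each cyclic edge
--     # j : (nodes[j], nodes[(j+1)%n]) -- its orientation, the head string a
--     # contig opening at j starts with, and the tail piece edge j contributes.
--     HEAD = {"+": 0, "-": 1, "*": 0}
--     TAIL = {"+": 0, "-": 0, "*": 1}
--     m = n if n > 1 else 0  # a single-node cycle traverses no edges
--     orient, head, tail = [], [], []
--     for j in range(m):
--         u, v = nodes[j], nodes[(j + 1) % n]
--         o = edges[(u, v)][2]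
--         orient.append(o)
--         head.append(contig_map[u][HEAD[o]])
--         tail.append(contig_map[v][TAIL[o]][edges[(u, v)][1][1]:])
--     # A contig breaks between consecutive cyclic edges j-1 and j exactly when
--     # (previous orientation is '*') differs from (current orientation is '-').
--     brk = [(orient[j - 1] == "*") != (orient[j] == "-") for j in range(m)]
--     cyclic_assemblies, cyclic_contigs_list = [], []
--     for i in range(len(all_rotations)):
--         idx = [(i + k) % n for k in range(n - 1)]
--         # split the rotation's edge-index run at the precomputed break points
--         segs = []
--         for k, j in enumerate(idx):
--             if k > 0 and not brk[j]:
--                 segs[-1].append(j)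
--             else:
--                 segs.append([j])
--         # assemble each segment; only the opening segment carries its head
--         pieces = []
--         for k, seg in enumerate(segs):
--             vs = "".join(nodes[(j + 1) % n] for j in seg)
--             body = "".join(tail[j] for j in seg)
--             if k == 0:
--                 pieces.append((nodes[i] + vs, head[i] + body))
--             else:
--                 pieces.append((vs, body))
--         if not pieces:
--             pieces = [(nodes[i], "")]
--         contigs, dist = {}, ref_size
--         for cid, c in pieces[:-1]:
--             contigs[cid] = c
--             dist -= len(c)
--         cid, c = pieces[-1]
--         if cid not in contigs:
--             contigs[cid] = c
--             dist -= len(c)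
--         cyclic_assemblies.append((contigs, dist, "".join(orient[j] for j in idx)))
--         cyclic_contigs_list.append(list(contigs))
--     return cyclic_assemblies, all_rotations, cyclic_contigs_list
-- ===== Notes on version B (the rewrite author's own statement) =====
-- stated objective: alternative
-- what changed: Instead of re-running A's seven-variable state machine with dict lookups over every rotation, B precomputes once per cycle three per-edge arrays (orientation, segment head, tail piece) and a global cyclic break table ((prev=='*') != (cur=='-')); each rotation is then handled by splitting its edge-index run at the precomputed break points and joining each segment's precomputed pieces. …
import Mathlib
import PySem

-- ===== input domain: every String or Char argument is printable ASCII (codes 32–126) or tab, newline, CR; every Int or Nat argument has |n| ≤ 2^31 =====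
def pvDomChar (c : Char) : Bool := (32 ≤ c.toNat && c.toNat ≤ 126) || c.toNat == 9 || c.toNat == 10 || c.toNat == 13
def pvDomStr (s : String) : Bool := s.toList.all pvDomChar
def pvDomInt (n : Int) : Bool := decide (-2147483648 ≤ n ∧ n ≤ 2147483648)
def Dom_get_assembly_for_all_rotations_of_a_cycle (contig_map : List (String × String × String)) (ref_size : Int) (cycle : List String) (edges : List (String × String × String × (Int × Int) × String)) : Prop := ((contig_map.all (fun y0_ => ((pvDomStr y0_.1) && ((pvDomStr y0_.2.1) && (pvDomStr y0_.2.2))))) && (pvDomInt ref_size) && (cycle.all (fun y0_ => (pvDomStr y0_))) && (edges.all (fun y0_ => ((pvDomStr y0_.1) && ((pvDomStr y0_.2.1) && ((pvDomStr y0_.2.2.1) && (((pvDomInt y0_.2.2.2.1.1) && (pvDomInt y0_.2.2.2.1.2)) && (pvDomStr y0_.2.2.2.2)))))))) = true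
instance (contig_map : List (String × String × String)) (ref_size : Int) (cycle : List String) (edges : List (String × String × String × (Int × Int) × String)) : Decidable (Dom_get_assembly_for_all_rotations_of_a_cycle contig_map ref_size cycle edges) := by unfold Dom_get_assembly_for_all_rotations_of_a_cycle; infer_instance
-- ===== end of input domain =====

-- B precomputes per-cyclic-edge arrays (orientation, head, tail) and a global break table once,
-- then assembles every rotation by splitting its edge-index run at the precomputed break points;
-- objective: alternative algorithm, same asymptotic cost.

-- ===== shared dict/lookup helpers (both ports read the same input dictionaries) =====
-- Python's contig_map / edges parameters are dicts; lookup = first match in the association list.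
def pvCmDict (contig_map : List (String × String × String)) : PySem.Dict String (String × String) :=
  PySem.Dict.mk (contig_map.map (fun e => (e.1, e.2)))
def pvEdgeDict (edges : List (String × String × String × (Int × Int) × String)) :
    PySem.Dict (String × String) (String × (Int × Int) × String) :=
  PySem.Dict.mk (edges.map (fun e => ((e.1, e.2.1), e.2.2)))
-- total lookups; Python raises KeyError where get? = none, which Pre_ excludes (defaults never read under Pre_)
def pvCm (cm : PySem.Dict String (String × String)) (u : String) : String × String :=
  (cm.get? u).getD ("", "")
def pvEdge (ed : PySem.Dict (String × String) (String × (Int × Int) × String)) (u v : String) :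
    String × (Int × Int) × String :=
  (ed.get? (u, v)).getD ("", (0, 0), "")

-- ===== PORT A =====
-- A-state: (current_contigs, current_orientations, current_contig, current_contig_id, current_dist, last_edge, flag)
abbrev pvAState := PySem.Dict String String × String × String × String × Int × String × Bool

def pvAStep (cm : PySem.Dict String (String × String))
    (ed : PySem.Dict (String × String) (String × (Int × Int) × String))
    (st : pvAState) (u v : String) : pvAState :=
  match st with
  | (contigs, orient, contig, cid, dist, last, flag) =>
    let e := pvEdge ed u v
    let o := e.2.2
    let b := e.2.1.2
    if flag = false then
      let cl : String × String :=
        if o = "+" then ((pvCm cm u).1 ++ PySem.Str.slice (pvCm cm v).1 (some b) none, "+")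
        else if o = "-" then ((pvCm cm u).2 ++ PySem.Str.slice (pvCm cm v).1 (some b) none, "-")
        else if o = "*" then ((pvCm cm u).1 ++ PySem.Str.slice (pvCm cm v).2 (some b) none, "*")
        else (contig, last)
      (contigs, orient ++ o, cl.1, cid ++ v, dist, cl.2, true)
    else if o = "+" then
      if last = "+" ∨ last = "-" then
        (contigs, orient ++ o, contig ++ PySem.Str.slice (pvCm cm v).1 (some b) none, cid ++ v, dist, "+", flag)
      else if last = "*" then
        (contigs.insert cid contig, orient ++ o, PySem.Str.slice (pvCm cm v).1 (some b) none, v, dist - PySem.Str.len contig, "+", flag)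
      else (contigs, orient ++ o, contig, cid, dist, "+", flag)
    else if o = "-" then
      if last = "+" ∨ last = "-" then
        (contigs.insert cid contig, orient ++ o, PySem.Str.slice (pvCm cm v).1 (some b) none, v, dist - PySem.Str.len contig, "-", flag)
      else if last = "*" then
        (contigs, orient ++ o, contig ++ PySem.Str.slice (pvCm cm v).1 (some b) none, cid ++ v, dist, "-", flag)
      else (contigs, orient ++ o, contig, cid, dist, "-", flag)
    else if o = "*" then
      if last = "+" ∨ last = "-" then
        (contigs, orient ++ o, contig ++ PySem.Str.slice (pvCm cm v).2 (some b) none, cid ++ v, dist, "*", flag)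
      else if last = "*" then
        (contigs.insert cid contig, orient ++ o, PySem.Str.slice (pvCm cm v).2 (some b) none, v, dist - PySem.Str.len contig, "*", flag)
      else (contigs, orient ++ o, contig, cid, dist, "*", flag)
    else (contigs, orient ++ o, contig, cid, dist, last, flag)

-- 'for i in range(1, len(r)): u, v = r[i-1], r[i]' carried as structural recursion with the previous element u
def pvALoop (cm : PySem.Dict String (String × String))
    (ed : PySem.Dict (String × String) (String × (Int × Int) × String))
    (st : pvAState) (u : String) : List String → pvAState
  | [] => st
  | v :: rest => pvALoop cm ed (pvAStep cm ed st u v) v rest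

def pvARot (cm : PySem.Dict String (String × String))
    (ed : PySem.Dict (String × String) (String × (Int × Int) × String))
    (ref_size : Int) (r : List String) : PySem.Dict String String × Int × String :=
  match pvALoop cm ed (PySem.Dict.empty, "", "", PySem.List.pyGetD r 0 "", ref_size, "", false)
      (PySem.List.pyGetD r 0 "") r.tail with
  | (contigs, orient, contig, cid, dist, _, _) =>
    if contigs.contains cid then (contigs, dist, orient)
    else (contigs.insert cid contig, dist - PySem.Str.len contig, orient)

def get_assembly_for_all_rotations_of_a_cycle (contig_map : List (String × String × String)) (ref_size : Int) (cycle : List String) (edges : List (String × String × String × (Int × Int) × String)) : (List ((List (String × String)) × Int × String)) × List (List String) × List (List String) :=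
  let L := PySem.List.slice cycle none (some (-1))
  let all_rotations := (PySem.List.pyRange 1 (PySem.List.len cycle - 1)).foldl
    (fun acc i => acc ++ [PySem.List.slice L (some i) none ++ PySem.List.slice L none (some i)]) [L]
  let cm := pvCmDict contig_map
  let ed := pvEdgeDict edges
  let res := all_rotations.foldl (fun acc r =>
    let t := pvARot cm ed ref_size r
    (acc.1 ++ [(t.1.items, t.2.1, t.2.2)], acc.2 ++ [t.1.keys])) ([], [])
  (res.1, all_rotations, res.2)

-- ===== PORT B =====
def pvJoin (xs : List String) : String := PySem.Str.join "" xs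

-- HEAD / TAIL orientation tables of Source B; indexing them raises KeyError off '+','-','*' (excluded by Pre_)
def pvHEAD : PySem.Dict String Int := PySem.Dict.mk [("+", 0), ("-", 1), ("*", 0)]
def pvTAIL : PySem.Dict String Int := PySem.Dict.mk [("+", 0), ("-", 0), ("*", 1)]
-- contig_map[u][k] for k ∈ {0,1} (the pair's components)
def pvSel (p : String × String) (k : Int) : String := if k = 1 then p.2 else p.1

-- the precompute loop of Source B: per cyclic edge j its orientation, head string and tail piece
def pvEdgeArrays (cm : PySem.Dict String (String × String))
    (ed : PySem.Dict (String × String) (String × (Int × Int) × String))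
    (nodes : List String) : List String × List String × List String :=
  let n : Int := PySem.List.len nodes
  let m : Int := if 1 < n then n else 0
  (PySem.List.pyRange 0 m).foldl (fun acc j =>
    let u := PySem.List.pyGetD nodes j ""
    let v := PySem.List.pyGetD nodes (PySem.Int.mod (j + 1) n) ""
    let e := pvEdge ed u v
    (acc.1 ++ [e.2.2],
     acc.2.1 ++ [pvSel (pvCm cm u) ((pvHEAD.get? e.2.2).getD 0)],
     acc.2.2 ++ [PySem.Str.slice (pvSel (pvCm cm v) ((pvTAIL.get? e.2.2).getD 0)) (some e.2.1.2) none]))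
    ([], [], [])

-- brk = [(orient[j-1] == "*") != (orient[j] == "-") for j in range(m)]
def pvBrk (orient : List String) : List Bool :=
  (PySem.List.pyRange 0 (PySem.List.len orient)).map (fun j =>
    decide (PySem.List.pyGetD orient (j - 1) "" = "*") != decide (PySem.List.pyGetD orient j "" = "-"))

-- body of Source B's per-rotation loop: split the index run at the breaks, assemble the segments
def pvRotAsm (nodes : List String) (n : Int) (orient head tail : List String) (brk : List Bool)
    (ref_size : Int) (i : Int) : PySem.Dict String String × Int × String :=
  let idx := (PySem.List.pyRange 0 (n - 1)).map (fun k => PySem.Int.mod (i + k) n)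
  let segs := (PySem.List.enumerate idx).foldl (fun (segs : List (List Int)) kj =>
    if 0 < kj.1 ∧ PySem.List.pyGetD brk kj.2 false = false then
      segs.dropLast ++ [segs.getLastD [] ++ [kj.2]]
    else segs ++ [[kj.2]]) []
  let pieces := (PySem.List.enumerate segs).foldl (fun (ps : List (String × String)) ks =>
    let vs := pvJoin (ks.2.map (fun j => PySem.List.pyGetD nodes (PySem.Int.mod (j + 1) n) ""))
    let body := pvJoin (ks.2.map (fun j => PySem.List.pyGetD tail j ""))
    ps ++ [if ks.1 = 0 then (PySem.List.pyGetD nodes i "" ++ vs, PySem.List.pyGetD head i "" ++ body)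
           else (vs, body)]) []
  let pieces := if pieces = [] then [(PySem.List.pyGetD nodes i "", "")] else pieces
  let cd := (PySem.List.slice pieces none (some (-1))).foldl
    (fun (cd : PySem.Dict String String × Int) p => (cd.1.insert p.1 p.2, cd.2 - PySem.Str.len p.2))
    (PySem.Dict.empty, ref_size)
  let lastp := PySem.List.pyGetD pieces (-1) ("", "")
  let fin := if cd.1.contains lastp.1 then cd
             else (cd.1.insert lastp.1 lastp.2, cd.2 - PySem.Str.len lastp.2)
  (fin.1, fin.2, pvJoin (idx.map (fun j => PySem.List.pyGetD orient j "")))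

def get_assembly_for_all_rotations_of_a_cycle_alt (contig_map : List (String × String × String)) (ref_size : Int) (cycle : List String) (edges : List (String × String × String × (Int × Int) × String)) : (List ((List (String × String)) × Int × String)) × List (List String) × List (List String) :=
  let nodes := PySem.List.slice cycle none (some (-1))
  let n := PySem.List.len nodes
  let all_rotations := (PySem.List.pyRange 0 (max 1 n)).map
    (fun i => PySem.List.slice nodes (some i) none ++ PySem.List.slice nodes none (some i))
  let cm := pvCmDict contig_map
  let ed := pvEdgeDict edges
  let arrs := pvEdgeArrays cm ed nodes
  let brk := pvBrk arrs.1
  let res := (PySem.List.pyRange 0 (PySem.List.len all_rotations)).foldl (fun acc i =>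
    let t := pvRotAsm nodes n arrs.1 arrs.2.1 arrs.2.2 brk ref_size i
    (acc.1 ++ [(t.1.items, t.2.1, t.2.2)], acc.2 ++ [t.1.keys])) ([], [])
  (res.1, all_rotations, res.2)

-- ===== PRECONDITION & SPEC =====
-- Pre_ excludes the inputs on which Python A raises (a cycle shorter than 2 nodes: IndexError on
-- rotation[0]; a missing edges or contig_map key among those every rotation pass looks up: KeyError)
-- and additionally the cycles in which some traversed edge's orientation label is not '+', '-' or
-- '*': there A returns a value assembled from stale loop state while B's orientation-table lookups
-- (HEAD[o]/TAIL[o]) raise KeyError.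
def Pre_get_assembly_for_all_rotations_of_a_cycle (contig_map : List (String × String × String)) (ref_size : Int) (cycle : List String) (edges : List (String × String × String × (Int × Int) × String)) : Prop :=
  2 ≤ cycle.length ∧
  (let L := PySem.List.slice cycle none (some (-1));
   L.length ≤ 1 ∨
   ((∀ j : Nat, j < L.length →
      ∃ e, (pvEdgeDict edges).get? (L.getD j "", L.getD ((j + 1) % L.length) "") = some e ∧
           (e.2.2 = "+" ∨ e.2.2 = "-" ∨ e.2.2 = "*")) ∧
    ∀ u ∈ L, ((pvCmDict contig_map).get? u).isSome = true))
instance (contig_map : List (String × String × String)) (ref_size : Int) (cycle : List String) (edges : List (String × String × String × (Int × Int) × String)) : Decidable (Pre_get_assembly_for_all_rotations_of_a_cycle contig_map ref_size cycle edges) := by unfold Pre_get_assembly_for_all_rotations_of_a_cycle; infer_instance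

def pvWitness_get_assembly_for_all_rotations_of_a_cycle : (List (String × String × String)) × Int × List String × (List (String × String × String × (Int × Int) × String)) :=
  ([("a", "ACGT", "acgt"), ("b", "TT", "tt")], 9, ["a", "b", "a"],
   [("a", "b", "e1", (0, 1), "+"), ("b", "a", "e2", (0, 0), "-")])

def Spec_get_assembly_for_all_rotations_of_a_cycle (contig_map : List (String × String × String)) (ref_size : Int) (cycle : List String) (edges : List (String × String × String × (Int × Int) × String)) (out : (List ((List (String × String)) × Int × String)) × List (List String) × List (List String)) : Prop := out = get_assembly_for_all_rotations_of_a_cycle_alt contig_map ref_size cycle edges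
instance (contig_map : List (String × String × String)) (ref_size : Int) (cycle : List String) (edges : List (String × String × String × (Int × Int) × String)) (out : (List ((List (String × String)) × Int × String)) × List (List String) × List (List String)) : Decidable (Spec_get_assembly_for_all_rotations_of_a_cycle contig_map ref_size cycle edges out) := by unfold Spec_get_assembly_for_all_rotations_of_a_cycle; infer_instance

-- ===== CLAIM (what is proved, stated in full; the proofs are below) =====
def Claim_equal_get_assembly_for_all_rotations_of_a_cycle : Prop := ∀ (contig_map : List (String × String × String)) (ref_size : Int) (cycle : List String) (edges : List (String × String × String × (Int × Int) × String)), Dom_get_assembly_for_all_rotations_of_a_cycle contig_map ref_size cycle edges → Pre_get_assembly_for_all_rotations_of_a_cycle contig_map ref_size cycle edges → Spec_get_assembly_for_all_rotations_of_a_cycle contig_map ref_size cycle edges (get_assembly_for_all_rotations_of_a_cycle contig_map ref_size cycle edges)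

-- ===== LEMMAS AND PROOFS =====

-- ---- middle layer: the per-rotation segment machine (proof-only; A is proved equal to it on
-- ---- every input, and it is proved equal to B's precomputed-array assembly under Pre_) ----

-- M-state: (closed segments, ids, parts, last, started)
abbrev pvMState := List (List String × List String) × List String × List String × String × Bool

def pvMStep (cm : PySem.Dict String (String × String))
    (ed : PySem.Dict (String × String) (String × (Int × Int) × String))
    (st : pvMState) (p : String × String) : pvMState :=
  match st with
  | (closed, ids, parts, last, started) =>
    let o := (pvEdge ed p.1 p.2).2.2
    if ¬ (o = "+" ∨ o = "-" ∨ o = "*") then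
      if started = false then (closed, ids ++ [p.2], parts, last, true)
      else (closed, ids, parts, last, started)
    else
      let piece := PySem.Str.slice (if o = "*" then (pvCm cm p.2).2 else (pvCm cm p.2).1)
        (some (pvEdge ed p.1 p.2).2.1.2) none
      if started = false then
        (closed, ids ++ [p.2], [(if o = "-" then (pvCm cm p.1).2 else (pvCm cm p.1).1), piece], o, true)
      else if last = "" then (closed, ids, parts, o, started)
      else if (decide (last = "*") != decide (o = "-")) = true then
        (closed ++ [(ids, parts)], [p.2], [piece], o, started)
      else (closed, ids ++ [p.2], parts ++ [piece], o, started)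

def pvP2 (ref_size : Int) (closed : List (List String × List String)) : PySem.Dict String String × Int :=
  closed.foldl (fun cd seg =>
    let c := pvJoin seg.2
    (cd.1.insert (pvJoin seg.1) c, cd.2 - PySem.Str.len c)) (PySem.Dict.empty, ref_size)

def pvMRot (cm : PySem.Dict String (String × String))
    (ed : PySem.Dict (String × String) (String × (Int × Int) × String))
    (ref_size : Int) (r : List String) : PySem.Dict String String × Int × String :=
  let pairs := r.zip r.tail
  let orients := pvJoin (pairs.map (fun p => (pvEdge ed p.1 p.2).2.2))
  match pairs.foldl (pvMStep cm ed) ([], [PySem.List.pyGetD r 0 ""], [], "", false) with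
  | (closed, ids, parts, _, _) =>
    let cd := pvP2 ref_size closed
    let cid := pvJoin ids
    let c := pvJoin parts
    if cd.1.contains cid then (cd.1, cd.2, orients)
    else (cd.1.insert cid c, cd.2 - PySem.Str.len c, orients)

lemma intercalate_nil_sep (l : List (List Char)) : List.intercalate ([] : List Char) l = l.flatten := by
  induction l with
  | nil => rfl
  | cons x xs ih =>
    cases xs with
    | nil => simp [List.intercalate]
    | cons y ys =>
      simp only [List.intercalate, List.intersperse] at *
      simp_all

lemma pvJoin_toList (xs : List String) : (pvJoin xs).toList = (xs.map String.toList).flatten := by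
  simp [pvJoin, PySem.Str.toList_join, PySem.Chars.join, intercalate_nil_sep]

lemma pvJoin_nil : pvJoin [] = "" := rfl

lemma pvJoin_cons (x : String) (xs : List String) : pvJoin (x :: xs) = x ++ pvJoin xs := by
  apply String.toList_inj.mp
  simp [pvJoin_toList]

lemma pvJoin_singleton (x : String) : pvJoin [x] = x := by
  apply String.toList_inj.mp
  simp [pvJoin_toList]

lemma pvJoin_append_singleton (xs : List String) (x : String) :
    pvJoin (xs ++ [x]) = pvJoin xs ++ x := by
  apply String.toList_inj.mp
  simp [pvJoin_toList]

lemma pvP2_snoc (ref_size : Int) (closed : List (List String × List String))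
    (seg : List String × List String) :
    pvP2 ref_size (closed ++ [seg]) =
      ((pvP2 ref_size closed).1.insert (pvJoin seg.1) (pvJoin seg.2),
       (pvP2 ref_size closed).2 - PySem.Str.len (pvJoin seg.2)) := by
  simp [pvP2, List.foldl_append]

lemma pvMStep_last (cm : PySem.Dict String (String × String))
    (ed : PySem.Dict (String × String) (String × (Int × Int) × String))
    (st : pvMState) (p : String × String)
    (h : st.2.2.2.1 = "" ∨ st.2.2.2.1 = "+" ∨ st.2.2.2.1 = "-" ∨ st.2.2.2.1 = "*") :
    (pvMStep cm ed st p).2.2.2.1 = "" ∨ (pvMStep cm ed st p).2.2.2.1 = "+" ∨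
    (pvMStep cm ed st p).2.2.2.1 = "-" ∨ (pvMStep cm ed st p).2.2.2.1 = "*" := by
  obtain ⟨closed, ids, parts, last, started⟩ := st
  simp only [pvMStep]
  by_cases h1 : (pvEdge ed p.1 p.2).2.2 = "+" <;>
  by_cases h2 : (pvEdge ed p.1 p.2).2.2 = "-" <;>
  by_cases h3 : (pvEdge ed p.1 p.2).2.2 = "*" <;>
  split_ifs <;> simp_all

lemma pvStep_corr (cm : PySem.Dict String (String × String))
    (ed : PySem.Dict (String × String) (String × (Int × Int) × String))
    (ref_size : Int) (orien : String) (closed : List (List String × List String))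
    (ids parts : List String) (last : String) (started : Bool) (u v : String)
    (hlast : last = "" ∨ last = "+" ∨ last = "-" ∨ last = "*") :
    pvAStep cm ed ((pvP2 ref_size closed).1, orien, pvJoin parts, pvJoin ids, (pvP2 ref_size closed).2, last, started) u v
      = (let st := pvMStep cm ed (closed, ids, parts, last, started) (u, v)
         ((pvP2 ref_size st.1).1, orien ++ (pvEdge ed u v).2.2, pvJoin st.2.2.1, pvJoin st.2.1,
          (pvP2 ref_size st.1).2, st.2.2.2.1, st.2.2.2.2)) := by
  rcases hlast with rfl | rfl | rfl | rfl <;>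
  · simp only [pvAStep, pvMStep]
    by_cases h1 : (pvEdge ed u v).2.2 = "+" <;>
    by_cases h2 : (pvEdge ed u v).2.2 = "-" <;>
    by_cases h3 : (pvEdge ed u v).2.2 = "*" <;>
    cases started <;>
    simp_all [pvP2_snoc, pvJoin_cons, pvJoin_nil, pvJoin_append_singleton]

lemma pvLoop_corr (cm : PySem.Dict String (String × String))
    (ed : PySem.Dict (String × String) (String × (Int × Int) × String)) (ref_size : Int) :
    ∀ (vs : List String) (u : String) (closed : List (List String × List String))
      (ids parts : List String) (last : String) (started : Bool) (orien : String),
      (last = "" ∨ last = "+" ∨ last = "-" ∨ last = "*") →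
      pvALoop cm ed ((pvP2 ref_size closed).1, orien, pvJoin parts, pvJoin ids, (pvP2 ref_size closed).2, last, started) u vs
        = (let st := ((u :: vs).zip vs).foldl (pvMStep cm ed) (closed, ids, parts, last, started)
           ((pvP2 ref_size st.1).1,
            orien ++ pvJoin (((u :: vs).zip vs).map (fun p => (pvEdge ed p.1 p.2).2.2)),
            pvJoin st.2.2.1, pvJoin st.2.1, (pvP2 ref_size st.1).2, st.2.2.2.1, st.2.2.2.2)) := by
  intro vs
  induction vs with
  | nil =>
    intro u closed ids parts last started orien _
    simp [pvALoop, pvJoin_nil]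
  | cons v rest ih =>
    intro u closed ids parts last started orien hlast
    have hl' := pvMStep_last cm ed (closed, ids, parts, last, started) (u, v) hlast
    simp only [List.zip_cons_cons, List.foldl_cons, List.map_cons, pvJoin_cons, pvALoop]
    rw [pvStep_corr cm ed ref_size orien closed ids parts last started u v hlast]
    rcases hEq : pvMStep cm ed (closed, ids, parts, last, started) (u, v) with ⟨c', i', p', l', s'⟩
    rw [hEq] at hl'
    rw [ih v c' i' p' l' s' (orien ++ (pvEdge ed u v).2.2) hl']
    simp [String.append_assoc]

lemma pvARot_eq_pvMRot (cm : PySem.Dict String (String × String))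
    (ed : PySem.Dict (String × String) (String × (Int × Int) × String))
    (ref_size : Int) (r : List String) :
    pvARot cm ed ref_size r = pvMRot cm ed ref_size r := by
  cases r with
  | nil => simp [pvARot, pvMRot, pvALoop, pvP2, pvJoin_cons, pvJoin_nil]
  | cons u vs =>
    simp only [pvARot, pvMRot, List.tail_cons, PySem.List.pyGetD_zero_cons]
    have h := pvLoop_corr cm ed ref_size vs u [] [u] [] "" false "" (Or.inl rfl)
    rw [pvJoin_singleton] at h
    simp only [pvP2, List.foldl_nil, pvJoin_nil] at h
    rcases hst : ((u :: vs).zip vs).foldl (pvMStep cm ed) ([], [u], [], "", false) with ⟨c, i, pa, l, st⟩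
    rw [hst] at h
    rw [h]
    simp [pvP2]

lemma pvSlice_to_zero {α : Type} (L : List α) : PySem.List.slice L none (some 0) = [] := by
  simpa using PySem.List.slice_to_natCast (xs := L) (b := 0)

lemma pvRots_eq (cycle : List String) :
    (PySem.List.pyRange 1 (PySem.List.len cycle - 1)).foldl
      (fun acc i => acc ++ [PySem.List.slice (PySem.List.slice cycle none (some (-1))) (some i) none ++
        PySem.List.slice (PySem.List.slice cycle none (some (-1))) none (some i)])
      [PySem.List.slice cycle none (some (-1))]
    = (PySem.List.pyRange 0 (max 1 (PySem.List.len (PySem.List.slice cycle none (some (-1)))))).map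
      (fun i => PySem.List.slice (PySem.List.slice cycle none (some (-1))) (some i) none ++
        PySem.List.slice (PySem.List.slice cycle none (some (-1))) none (some i)) := by
  rw [PySem.List.foldl_append_singleton_eq_map]
  cases cycle with
  | nil => decide
  | cons a t =>
    rw [PySem.List.slice_to_neg_one]
    have hlen : PySem.List.len ((a :: t).dropLast) = (t.length : Int) := by
      simp [PySem.List.len_eq]
    have hlenc : PySem.List.len (a :: t) - 1 = (t.length : Int) := by
      simp [PySem.List.len_eq]
    rw [hlen, hlenc]
    rcases Nat.eq_zero_or_pos t.length with h0 | hpos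
    · obtain rfl : t = [] := List.length_eq_zero_iff.mp h0
      have h1 : PySem.List.pyRange 1 ((([] : List String).length : Int)) = [] := by decide
      have h2 : PySem.List.pyRange 0 (max 1 (([] : List String).length : Int)) = [0] := by decide
      rw [h1, h2]
      simp [pvSlice_to_zero]
    · have hmax : max 1 (t.length : Int) = (t.length : Int) := by omega
      rw [hmax, PySem.List.pyRange_one_cons (by exact_mod_cast hpos : (0 : Int) < (t.length : Int))]
      simp [pvSlice_to_zero]

-- ---- bridge: per-edge functions in Nat-index form ----

def pvEF (ed : PySem.Dict (String × String) (String × (Int × Int) × String))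
    (nodes : List String) (j : Nat) : String × (Int × Int) × String :=
  pvEdge ed (nodes.getD j "") (nodes.getD ((j + 1) % nodes.length) "")

def pvOF (ed : PySem.Dict (String × String) (String × (Int × Int) × String))
    (nodes : List String) (j : Nat) : String := (pvEF ed nodes j).2.2

def pvHF (cm : PySem.Dict String (String × String))
    (ed : PySem.Dict (String × String) (String × (Int × Int) × String))
    (nodes : List String) (j : Nat) : String :=
  pvSel (pvCm cm (nodes.getD j "")) ((pvHEAD.get? (pvOF ed nodes j)).getD 0)

def pvTF (cm : PySem.Dict String (String × String))
    (ed : PySem.Dict (String × String) (String × (Int × Int) × String))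
    (nodes : List String) (j : Nat) : String :=
  PySem.Str.slice (pvSel (pvCm cm (nodes.getD ((j + 1) % nodes.length) ""))
    ((pvTAIL.get? (pvOF ed nodes j)).getD 0)) (some (pvEF ed nodes j).2.1.2) none

def pvBF (ed : PySem.Dict (String × String) (String × (Int × Int) × String))
    (nodes : List String) (j : Nat) : Bool :=
  decide (pvOF ed nodes ((j + (nodes.length - 1)) % nodes.length) = "*") !=
  decide (pvOF ed nodes j = "-")

-- Nat-index version of the segs fold
def pvNatStep (N i : Nat) (bFn : Nat → Bool) (segs : List (List Nat)) (k : Nat) : List (List Nat) :=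
  if 0 < k ∧ bFn ((i + k) % N) = false then segs.dropLast ++ [segs.getLastD [] ++ [(i + k) % N]]
  else segs ++ [[(i + k) % N]]

def pvPieceF (cm : PySem.Dict String (String × String))
    (ed : PySem.Dict (String × String) (String × (Int × Int) × String))
    (nodes : List String) (i : Nat) (kj : Int × List Nat) : String × String :=
  let vs := pvJoin (kj.2.map (fun j => nodes.getD ((j + 1) % nodes.length) ""))
  let body := pvJoin (kj.2.map (pvTF cm ed nodes))
  if kj.1 = 0 then (nodes.getD i "" ++ vs, pvHF cm ed nodes i ++ body) else (vs, body)

def pvPieces (cm : PySem.Dict String (String × String))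
    (ed : PySem.Dict (String × String) (String × (Int × Int) × String))
    (nodes : List String) (i : Nat) (segs : List (List Nat)) : List (String × String) :=
  (PySem.List.enumerate segs).map (pvPieceF cm ed nodes i)

-- the whole bridge, per rotation, stated and proved below in stages
-- lookup-table evaluations (kernel-reducible)
lemma pvHEAD_plus (p : String × String) : pvSel p ((pvHEAD.get? "+").getD 0) = p.1 := rfl
lemma pvHEAD_minus (p : String × String) : pvSel p ((pvHEAD.get? "-").getD 0) = p.2 := rfl
lemma pvHEAD_star (p : String × String) : pvSel p ((pvHEAD.get? "*").getD 0) = p.1 := rfl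
lemma pvTAIL_plus (p : String × String) : pvSel p ((pvTAIL.get? "+").getD 0) = p.1 := rfl
lemma pvTAIL_minus (p : String × String) : pvSel p ((pvTAIL.get? "-").getD 0) = p.1 := rfl
lemma pvTAIL_star (p : String × String) : pvSel p ((pvTAIL.get? "*").getD 0) = p.2 := rfl

lemma pvCastAdd (k : Nat) : ((k : Int) + 1) = ((k + 1 : Nat) : Int) := by push_cast; ring

lemma pvFlattenSingleton {a b : Type} (f : a → b) (l : List a) :
    (l.map (fun x => [f x])).flatten = l.map f := by
  induction l <;> simp_all

lemma pvEdgeArrays_eq (cm : PySem.Dict String (String × String))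
    (ed : PySem.Dict (String × String) (String × (Int × Int) × String))
    (nodes : List String) (hN : 2 ≤ nodes.length) :
    pvEdgeArrays cm ed nodes =
      ((List.range nodes.length).map (pvOF ed nodes),
       (List.range nodes.length).map (pvHF cm ed nodes),
       (List.range nodes.length).map (pvTF cm ed nodes)) := by
  simp only [pvEdgeArrays, PySem.List.len_eq]
  rw [if_pos (by exact_mod_cast hN : (1 : Int) < (nodes.length : Int))]
  rw [PySem.List.pyRange_zero_natCast, List.foldl_map]
  refine Eq.trans (PySem.List.foldl_congr_mem _ _
    (fun (x : List String × List String × List String) (y : Nat) =>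
      (x.1 ++ [pvOF ed nodes y], x.2.1 ++ [pvHF cm ed nodes y], x.2.2 ++ [pvTF cm ed nodes y]))
    _ ?_) ?_
  · intro acc k _
    rw [show PySem.Int.mod ((k : Int) + 1) (nodes.length : Int)
        = (((k + 1) % nodes.length : Nat) : Int) from by rw [pvCastAdd k, PySem.Int.mod_natCast]]
    simp only [PySem.List.pyGetD_natCast, pvOF, pvHF, pvTF, pvEF]
  · rw [PySem.List.foldl_prod_mk
      (f := fun (a : List String) (k : Nat) => a ++ [pvOF ed nodes k])
      (g := fun (b : List String × List String) (k : Nat) =>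
        (b.1 ++ [pvHF cm ed nodes k], b.2 ++ [pvTF cm ed nodes k]))]
    rw [PySem.List.foldl_prod_mk
      (f := fun (a : List String) (k : Nat) => a ++ [pvHF cm ed nodes k])
      (g := fun (b : List String) (k : Nat) => b ++ [pvTF cm ed nodes k])]
    simp [PySem.List.foldl_append_singleton_eq_map]
    exact ⟨pvFlattenSingleton _ _, pvFlattenSingleton _ _, pvFlattenSingleton _ _⟩

lemma pvBrk_getD (ed : PySem.Dict (String × String) (String × (Int × Int) × String))
    (nodes : List String) (hN : 2 ≤ nodes.length) (j : Nat) (hj : j < nodes.length) :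
    PySem.List.pyGetD (pvBrk ((List.range nodes.length).map (pvOF ed nodes))) (j : Int) false
      = pvBF ed nodes j := by
  unfold pvBrk pvBF
  have hlen : PySem.List.len ((List.range nodes.length).map (pvOF ed nodes))
      = (nodes.length : Int) := by simp [PySem.List.len_eq]
  rw [hlen,
    PySem.List.pyGetD_map_pyRange_of_nonneg _ _ _ _ (by positivity) (by exact_mod_cast hj)]
  have e2 : PySem.List.pyGetD ((List.range nodes.length).map (pvOF ed nodes)) (j : Int) ""
      = pvOF ed nodes j := by
    rw [PySem.List.pyGetD_natCast, PySem.List.getD_map_range _ _ _ _ hj]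
  rcases Nat.eq_zero_or_pos j with rfl | hj1
  · have e1 : PySem.List.pyGetD ((List.range nodes.length).map (pvOF ed nodes)) (((0 : Nat) : Int) - 1) ""
        = pvOF ed nodes (nodes.length - 1) := by
      have h0 : (((0 : Nat) : Int) - 1) = -1 := by norm_num
      rw [h0, PySem.List.pyGetD_neg_one _ _ (List.ne_nil_of_length_pos (by simp; omega))]
      rw [List.getLast_eq_getElem]
      simp
    rw [e1, e2]
    have : (0 + (nodes.length - 1)) % nodes.length = nodes.length - 1 := by
      rw [Nat.zero_add, Nat.mod_eq_of_lt (by omega)]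
    rw [this]
  · have hc : ((j : Int) - 1) = ((j - 1 : Nat) : Int) := by omega
    have e1 : PySem.List.pyGetD ((List.range nodes.length).map (pvOF ed nodes)) ((j : Int) - 1) ""
        = pvOF ed nodes (j - 1) := by
      rw [hc, PySem.List.pyGetD_natCast, PySem.List.getD_map_range _ _ _ _ (by omega)]
    rw [e1, e2]
    have : (j + (nodes.length - 1)) % nodes.length = j - 1 := by
      have h1 : j + (nodes.length - 1) = (j - 1) + nodes.length := by omega
      rw [h1, Nat.add_mod_right, Nat.mod_eq_of_lt (by omega)]
    rw [this]

lemma pvRotGetD (nodes : List String) (i k : Nat) (hi : i < nodes.length) (hk : k < nodes.length) :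
    (nodes.drop i ++ nodes.take i).getD k "" = nodes.getD ((i + k) % nodes.length) "" := by
  rw [List.getD_eq_getElem?_getD, List.getD_eq_getElem?_getD]
  by_cases h : k < nodes.length - i
  · rw [List.getElem?_append_left (by simp [List.length_drop]; omega), List.getElem?_drop]
    have : (i + k) % nodes.length = i + k := Nat.mod_eq_of_lt (by omega)
    rw [this]
  · rw [List.getElem?_append_right (by simp [List.length_drop]; omega)]
    rw [List.getElem?_take]
    have hl : (nodes.drop i).length = nodes.length - i := by simp [List.length_drop]
    rw [hl, if_pos (by omega)]
    have h2 : (i + k) % nodes.length = k - (nodes.length - i) := by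
      rw [Nat.mod_eq_sub_mod (by omega), Nat.mod_eq_of_lt (by omega)]
      omega
    rw [h2]

lemma pvPairs_eq (nodes : List String) (i : Nat) (hi : i < nodes.length) :
    ((nodes.drop i ++ nodes.take i).zip (nodes.drop i ++ nodes.take i).tail)
      = (List.range (nodes.length - 1)).map
          (fun k => (nodes.getD ((i + k) % nodes.length) "",
                     nodes.getD ((i + k + 1) % nodes.length) "")) := by
  have hlr : (nodes.drop i ++ nodes.take i).length = nodes.length := by
    simp [List.length_drop, List.length_take]; omega
  apply List.ext_getElem
  · simp [List.length_zip, hlr]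
  · intro k h1 h2
    have hk : k < nodes.length - 1 := by simpa using h2
    simp only [List.getElem_zip, List.getElem_map, List.getElem_range, List.getElem_tail]
    have hkN : k < nodes.length := by omega
    have hk1N : k + 1 < nodes.length := by omega
    have ha : (nodes.drop i ++ nodes.take i)[k]'(by rw [hlr]; omega)
        = nodes.getD ((i + k) % nodes.length) "" := by
      rw [← List.getD_eq_getElem _ "" (by rw [hlr]; omega)]
      exact pvRotGetD nodes i k hi hkN
    have hb : (nodes.drop i ++ nodes.take i)[k + 1]'(by rw [hlr]; omega)
        = nodes.getD ((i + k + 1) % nodes.length) "" := by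
      rw [← List.getD_eq_getElem _ "" (by rw [hlr]; omega)]
      rw [pvRotGetD nodes i (k + 1) hi hk1N, ← Nat.add_assoc]
    rw [ha, hb]

lemma pvEnumerate_map {a b : Type} (f : a → b) : ∀ (l : List a) (s : Int),
    PySem.List.enumerate (l.map f) s = (PySem.List.enumerate l s).map (fun p => (p.1, f p.2)) := by
  intro l
  induction l with
  | nil => intro s; simp [PySem.List.enumerate_nil]
  | cons x xs ih => intro s; simp [PySem.List.enumerate_cons, ih]

lemma pvGetLastD_map {a b : Type} (g : a → b) (l : List a) (d : a) :
    (l.map g).getLastD (g d) = g (l.getLastD d) := by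
  cases l with
  | nil => rfl
  | cons x xs =>
    rw [List.getLastD_eq_getLast?, List.getLastD_eq_getLast?, List.getLast?_map]
    cases (x :: xs).getLast? <;> rfl

def pvMFold (cm : PySem.Dict String (String × String))
    (ed : PySem.Dict (String × String) (String × (Int × Int) × String))
    (nodes : List String) (i t : Nat) : pvMState :=
  (List.range t).foldl (fun s k =>
    pvMStep cm ed s (nodes.getD ((i + k) % nodes.length) "",
                     nodes.getD ((i + k + 1) % nodes.length) ""))
    ([], [nodes.getD i ""], [], "", false)

def pvSegsN (ed : PySem.Dict (String × String) (String × (Int × Int) × String))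
    (nodes : List String) (i t : Nat) : List (List Nat) :=
  (List.range t).foldl (pvNatStep nodes.length i (pvBF ed nodes)) []

lemma pvMFold_succ (cm : PySem.Dict String (String × String))
    (ed : PySem.Dict (String × String) (String × (Int × Int) × String))
    (nodes : List String) (i t : Nat) :
    pvMFold cm ed nodes i (t + 1)
      = pvMStep cm ed (pvMFold cm ed nodes i t)
          (nodes.getD ((i + t) % nodes.length) "", nodes.getD ((i + t + 1) % nodes.length) "") := by
  simp [pvMFold, List.range_succ]

lemma pvSegsN_succ (ed : PySem.Dict (String × String) (String × (Int × Int) × String))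
    (nodes : List String) (i t : Nat) :
    pvSegsN ed nodes i (t + 1)
      = pvNatStep nodes.length i (pvBF ed nodes) (pvSegsN ed nodes i t) t := by
  simp [pvSegsN, List.range_succ]

lemma pvPieceF_mk (cm : PySem.Dict String (String × String))
    (ed : PySem.Dict (String × String) (String × (Int × Int) × String))
    (nodes : List String) (i : Nat) (m : Int) (seg : List Nat) :
    pvPieceF cm ed nodes i (m, seg)
      = (if m = 0
         then (nodes.getD i "" ++ pvJoin (seg.map (fun j => nodes.getD ((j + 1) % nodes.length) "")),
               pvHF cm ed nodes i ++ pvJoin (seg.map (pvTF cm ed nodes)))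
         else (pvJoin (seg.map (fun j => nodes.getD ((j + 1) % nodes.length) "")),
               pvJoin (seg.map (pvTF cm ed nodes)))) := rfl

lemma pvPieces_concat (cm : PySem.Dict String (String × String))
    (ed : PySem.Dict (String × String) (String × (Int × Int) × String))
    (nodes : List String) (i : Nat) (s : List (List Nat)) (x : List Nat) :
    pvPieces cm ed nodes i (s ++ [x])
      = pvPieces cm ed nodes i s ++ [pvPieceF cm ed nodes i ((s.length : Int), x)] := by
  unfold pvPieces
  rw [PySem.List.enumerate_append]
  simp [PySem.List.enumerate_cons, PySem.List.enumerate_nil]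

lemma pvPieceF_snoc (cm : PySem.Dict String (String × String))
    (ed : PySem.Dict (String × String) (String × (Int × Int) × String))
    (nodes : List String) (i : Nat) (m : Int) (seg : List Nat) (j : Nat) :
    pvPieceF cm ed nodes i (m, seg ++ [j])
      = ((pvPieceF cm ed nodes i (m, seg)).1 ++ nodes.getD ((j + 1) % nodes.length) "",
         (pvPieceF cm ed nodes i (m, seg)).2 ++ pvTF cm ed nodes j) := by
  unfold pvPieceF
  by_cases hm : m = 0 <;> simp [hm, pvJoin_append_singleton, String.append_assoc]

lemma pvSegsN_bound (ed : PySem.Dict (String × String) (String × (Int × Int) × String))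
    (nodes : List String) (i : Nat) (hN : 0 < nodes.length) :
    ∀ t, ∀ seg ∈ pvSegsN ed nodes i t, ∀ j ∈ seg, j < nodes.length := by
  intro t
  induction t with
  | zero => simp [pvSegsN]
  | succ t ih =>
    intro seg hseg j hj
    rw [pvSegsN_succ] at hseg
    unfold pvNatStep at hseg
    have hmem : seg ∈ pvSegsN ed nodes i t ∨ seg = (pvSegsN ed nodes i t).getLastD [] ++ [(i + t) % nodes.length] ∨ seg = [(i + t) % nodes.length] := by
      split_ifs at hseg with hc
      · rcases List.mem_append.mp hseg with h | h
        · exact Or.inl ((List.dropLast_sublist _).subset h)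
        · exact Or.inr (Or.inl (List.mem_singleton.mp h))
      · rcases List.mem_append.mp hseg with h | h
        · exact Or.inl h
        · exact Or.inr (Or.inr (List.mem_singleton.mp h))
    have hlastmem : (pvSegsN ed nodes i t).getLastD [] = [] ∨ (pvSegsN ed nodes i t).getLastD [] ∈ pvSegsN ed nodes i t := by
      cases hS : pvSegsN ed nodes i t with
      | nil => left; rfl
      | cons a as =>
        right
        rw [List.getLastD_eq_getLast?, List.getLast?_eq_some_getLast (by simp)]
        simp [List.getLast_mem]
    rcases hmem with h | h | h
    · exact ih seg h j hj
    · subst h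
      rcases List.mem_append.mp hj with h' | h'
      · rcases hlastmem with he | he
        · rw [he] at h'; simp at h'
        · exact ih _ he j h'
      · rw [List.mem_singleton.mp h']; exact Nat.mod_lt _ hN
    · rw [h] at hj
      rw [List.mem_singleton.mp hj]; exact Nat.mod_lt _ hN

lemma pvInv (cm : PySem.Dict String (String × String))
    (ed : PySem.Dict (String × String) (String × (Int × Int) × String))
    (nodes : List String) (i : Nat) (hN : 2 ≤ nodes.length) (hi : i < nodes.length)
    (hv : ∀ j, j < nodes.length →
      pvOF ed nodes j = "+" ∨ pvOF ed nodes j = "-" ∨ pvOF ed nodes j = "*") :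
    ∀ t, 1 ≤ t →
      ∃ closed ids parts,
        pvMFold cm ed nodes i t
          = (closed, ids, parts, pvOF ed nodes ((i + (t - 1)) % nodes.length), true) ∧
        pvSegsN ed nodes i t ≠ [] ∧
        closed.map (fun c => (pvJoin c.1, pvJoin c.2)) ++ [(pvJoin ids, pvJoin parts)]
          = pvPieces cm ed nodes i (pvSegsN ed nodes i t) := by
  intro t ht
  induction t with
  | zero => omega
  | succ t ih =>
    have hN0 : 0 < nodes.length := by omega
    rcases Nat.eq_zero_or_pos t with rfl | ht1
    · -- first edge of the rotation
      have hmod0 : (i + 0) % nodes.length = i := by rw [Nat.add_zero, Nat.mod_eq_of_lt hi]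
      have ho := hv i hi
      have h0 : pvMFold cm ed nodes i 0 = ([], [nodes.getD i ""], [], "", false) := by
        simp [pvMFold]
      have hstep := pvMFold_succ cm ed nodes i 0
      rw [h0] at hstep
      simp only [Nat.add_zero, Nat.mod_eq_of_lt hi] at hstep ⊢
      refine ⟨[], [nodes.getD i "", nodes.getD ((i + 1) % nodes.length) ""],
        [pvHF cm ed nodes i, pvTF cm ed nodes i], ?_, ?_, ?_⟩
      · rw [hstep]
        simp only [pvOF, pvEF] at ho
        rcases ho with h | h | h <;>
        · simp only [pvMStep]
          rw [h]
          simp only [pvOF, pvEF, pvHF, pvTF]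
          rw [h]
          simp [pvHEAD_plus, pvHEAD_minus, pvHEAD_star, pvTAIL_plus, pvTAIL_minus, pvTAIL_star,
            Nat.mod_eq_of_lt hi]
          try exact h.symm
      · simp [pvSegsN_succ, pvSegsN, pvNatStep, Nat.mod_eq_of_lt hi]
      · have hS1 : pvSegsN ed nodes i 1 = [[i]] := by
          simp [pvSegsN_succ, pvSegsN, pvNatStep, Nat.mod_eq_of_lt hi]
        rw [hS1]
        unfold pvPieces pvPieceF
        simp [PySem.List.enumerate_cons, PySem.List.enumerate_nil,
          pvJoin_cons, pvJoin_singleton, pvJoin_nil]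
    · obtain ⟨closed, ids, parts, hM, hne, heq⟩ := ih ht1
      have hjt : (i + t) % nodes.length < nodes.length := Nat.mod_lt _ hN0
      have hAdd1 : ((i + t) % nodes.length + 1) % nodes.length = (i + t + 1) % nodes.length := by
        rw [Nat.mod_add_mod]
      have hPrev : ((i + t) % nodes.length + (nodes.length - 1)) % nodes.length
          = (i + (t - 1)) % nodes.length := by
        rw [Nat.mod_add_mod]
        have he : i + t + (nodes.length - 1) = (i + (t - 1)) + nodes.length := by omega
        rw [he, Nat.add_mod_right]
      have hov := hv ((i + t) % nodes.length) hjt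
      have holast := hv ((i + (t - 1)) % nodes.length) (Nat.mod_lt _ hN0)
      have hlastne : pvOF ed nodes ((i + (t - 1)) % nodes.length) ≠ "" := by
        rcases holast with h | h | h <;> simp [h]
      have hstep := pvMFold_succ cm ed nodes i t
      rw [hM] at hstep
      have horaw : (pvEdge ed (nodes.getD ((i + t) % nodes.length) "")
            (nodes.getD ((i + t + 1) % nodes.length) "")).2.2
          = pvOF ed nodes ((i + t) % nodes.length) := by
        unfold pvOF pvEF
        rw [hAdd1]
      have hpiece : PySem.Str.slice
            (if pvOF ed nodes ((i + t) % nodes.length) = "*"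
             then (pvCm cm (nodes.getD ((i + t + 1) % nodes.length) "")).2
             else (pvCm cm (nodes.getD ((i + t + 1) % nodes.length) "")).1)
            (some (pvEdge ed (nodes.getD ((i + t) % nodes.length) "")
              (nodes.getD ((i + t + 1) % nodes.length) "")).2.1.2) none
          = pvTF cm ed nodes ((i + t) % nodes.length) := by
        unfold pvTF pvEF
        rw [hAdd1]
        rcases hov with h | h | h <;> rw [h] <;>
          simp [pvTAIL_plus, pvTAIL_minus, pvTAIL_star]
      have hbrkval : (decide (pvOF ed nodes ((i + (t - 1)) % nodes.length) = "*")
            != decide (pvOF ed nodes ((i + t) % nodes.length) = "-"))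
          = pvBF ed nodes ((i + t) % nodes.length) := by
        unfold pvBF
        rw [hPrev]
      have hstate : pvMStep cm ed (closed, ids, parts, pvOF ed nodes ((i + (t - 1)) % nodes.length), true)
            (nodes.getD ((i + t) % nodes.length) "", nodes.getD ((i + t + 1) % nodes.length) "")
          = if pvBF ed nodes ((i + t) % nodes.length) = true
            then (closed ++ [(ids, parts)], [nodes.getD ((i + t + 1) % nodes.length) ""],
                  [pvTF cm ed nodes ((i + t) % nodes.length)],
                  pvOF ed nodes ((i + t) % nodes.length), true)
            else (closed, ids ++ [nodes.getD ((i + t + 1) % nodes.length) ""],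
                  parts ++ [pvTF cm ed nodes ((i + t) % nodes.length)],
                  pvOF ed nodes ((i + t) % nodes.length), true) := by
        simp only [pvMStep]
        rw [horaw, hpiece]
        rw [if_neg (not_not_intro hov), if_neg (by simp), if_neg hlastne, hbrkval]
      rw [hstate] at hstep
      by_cases hbrk : pvBF ed nodes ((i + t) % nodes.length) = true
      · rw [if_pos hbrk] at hstep
        have hlenpos : (pvSegsN ed nodes i t).length ≠ 0 := by
          simpa [List.length_eq_zero_iff] using hne
        refine ⟨closed ++ [(ids, parts)], [nodes.getD ((i + t + 1) % nodes.length) ""],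
          [pvTF cm ed nodes ((i + t) % nodes.length)], hstep, ?_, ?_⟩
        · rw [pvSegsN_succ]
          unfold pvNatStep
          rw [if_neg (by simp [hbrk])]
          simp
        · rw [pvSegsN_succ]
          unfold pvNatStep
          rw [if_neg (by simp [hbrk])]
          rw [pvPieces_concat]
          have hPF : pvPieceF cm ed nodes i (((pvSegsN ed nodes i t).length : Int),
                [(i + t) % nodes.length])
              = (nodes.getD ((i + t + 1) % nodes.length) "",
                 pvTF cm ed nodes ((i + t) % nodes.length)) := by
            rw [pvPieceF_mk, if_neg (Int.natCast_ne_zero.mpr hlenpos)]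
            simp [hAdd1, pvJoin_singleton]
          rw [hPF, List.map_append, List.append_assoc, ← heq]
          simp [pvJoin_singleton]
      · have hbf : pvBF ed nodes ((i + t) % nodes.length) = false := by simpa using hbrk
        rw [if_neg hbrk] at hstep
        obtain ⟨ds, ls, hds⟩ := (List.eq_nil_or_concat (pvSegsN ed nodes i t)).resolve_left hne
        rw [List.concat_eq_append] at hds
        have hSsucc : pvSegsN ed nodes i (t + 1) = ds ++ [ls ++ [(i + t) % nodes.length]] := by
          rw [pvSegsN_succ]
          unfold pvNatStep
          rw [if_pos ⟨ht1, hbf⟩, hds, List.dropLast_concat]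
          congr 2
          rw [List.getLastD_eq_getLast?, List.getLast?_concat]
          rfl
        rw [hds, pvPieces_concat] at heq
        obtain ⟨hc1, hc2⟩ := List.append_inj' heq rfl
        have hc2' : (pvJoin ids, pvJoin parts) = pvPieceF cm ed nodes i ((ds.length : Int), ls) := by
          have := congrArg (fun l => l.headD (pvJoin ids, pvJoin parts)) hc2
          simpa using this
        refine ⟨closed, ids ++ [nodes.getD ((i + t + 1) % nodes.length) ""],
          parts ++ [pvTF cm ed nodes ((i + t) % nodes.length)], hstep, ?_, ?_⟩
        · rw [hSsucc]; simp
        · rw [hSsucc, pvPieces_concat, pvPieceF_snoc, ← hc2', hc1]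
          simp [pvJoin_append_singleton, hAdd1]


lemma pvSegsI (ed : PySem.Dict (String × String) (String × (Int × Int) × String))
    (nodes : List String) (i : Nat) (hN : 2 ≤ nodes.length) : ∀ t : Nat,
    (PySem.List.enumerate ((List.range t).map (fun k => (((i + k) % nodes.length : Nat) : Int)))).foldl
      (fun (segs : List (List Int)) kj =>
        if 0 < kj.1 ∧ PySem.List.pyGetD (pvBrk ((List.range nodes.length).map (pvOF ed nodes))) kj.2 false = false
        then segs.dropLast ++ [segs.getLastD [] ++ [kj.2]]
        else segs ++ [[kj.2]]) []
      = (pvSegsN ed nodes i t).map (List.map (fun j : Nat => (j : Int))) := by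
  intro t
  induction t with
  | zero => simp [pvSegsN, PySem.List.enumerate_nil]
  | succ t ih =>
    rw [List.range_succ, List.map_append, PySem.List.enumerate_append, List.foldl_append]
    rw [ih, pvSegsN_succ]
    simp only [List.map_cons, List.map_nil, PySem.List.enumerate_cons, PySem.List.enumerate_nil,
      List.length_map, List.length_range, List.foldl_cons, List.foldl_nil, zero_add]
    rw [pvBrk_getD ed nodes hN _ (Nat.mod_lt _ (by omega))]
    unfold pvNatStep
    by_cases hc : 0 < t ∧ pvBF ed nodes ((i + t) % nodes.length) = false
    · rw [if_pos (by exact ⟨by exact_mod_cast hc.1, hc.2⟩), if_pos hc]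
      have hgl : ((pvSegsN ed nodes i t).map (List.map (fun j : Nat => (j : Int)))).getLastD []
          = List.map (fun j : Nat => (j : Int)) ((pvSegsN ed nodes i t).getLastD []) := by
        simpa using pvGetLastD_map (List.map (fun j : Nat => (j : Int))) (pvSegsN ed nodes i t) []
      rw [hgl]
      simp [List.map_dropLast]
    · rw [if_neg (by
        intro hcon
        exact hc ⟨by exact_mod_cast hcon.1, hcon.2⟩), if_neg hc]
      simp

lemma pvPiecesI (cm : PySem.Dict String (String × String))
    (ed : PySem.Dict (String × String) (String × (Int × Int) × String))
    (nodes : List String) (i : Nat) (hi : i < nodes.length)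
    (S : List (List Nat)) (hb : ∀ seg ∈ S, ∀ j ∈ seg, j < nodes.length) :
    (PySem.List.enumerate (S.map (List.map (fun j : Nat => (j : Int))))).foldl
      (fun (ps : List (String × String)) ks =>
        ps ++ [if ks.1 = 0
          then (PySem.List.pyGetD nodes (i : Int) ""
                  ++ pvJoin (ks.2.map (fun j => PySem.List.pyGetD nodes (PySem.Int.mod (j + 1) (nodes.length : Int)) "")),
                PySem.List.pyGetD ((List.range nodes.length).map (pvHF cm ed nodes)) (i : Int) ""
                  ++ pvJoin (ks.2.map (fun j => PySem.List.pyGetD ((List.range nodes.length).map (pvTF cm ed nodes)) j "")))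
          else (pvJoin (ks.2.map (fun j => PySem.List.pyGetD nodes (PySem.Int.mod (j + 1) (nodes.length : Int)) "")),
                pvJoin (ks.2.map (fun j => PySem.List.pyGetD ((List.range nodes.length).map (pvTF cm ed nodes)) j "")))]) []
      = pvPieces cm ed nodes i S := by
  rw [pvEnumerate_map, List.foldl_map, PySem.List.foldl_append_singleton_eq_map, List.nil_append]
  unfold pvPieces
  apply List.map_congr_left
  intro p hp
  have hmem : p.2 ∈ S := by
    rcases (PySem.List.mem_enumerate_iff _ _ _).mp hp with ⟨k, hk, hpk⟩
    rw [hpk]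
    exact List.getElem_mem hk
  have hseg : ∀ j ∈ p.2, j < nodes.length := hb p.2 hmem
  have hvs : (p.2.map (fun j : Nat => (j : Int))).map
        (fun j => PySem.List.pyGetD nodes (PySem.Int.mod (j + 1) (nodes.length : Int)) "")
      = p.2.map (fun j => nodes.getD ((j + 1) % nodes.length) "") := by
    rw [List.map_map]
    apply List.map_congr_left
    intro j _
    show PySem.List.pyGetD nodes (PySem.Int.mod ((j : Int) + 1) (nodes.length : Int)) "" = _
    rw [pvCastAdd j, PySem.Int.mod_natCast, PySem.List.pyGetD_natCast]
  have hbody : (p.2.map (fun j : Nat => (j : Int))).map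
        (fun j => PySem.List.pyGetD ((List.range nodes.length).map (pvTF cm ed nodes)) j "")
      = p.2.map (pvTF cm ed nodes) := by
    rw [List.map_map]
    apply List.map_congr_left
    intro j hj
    show PySem.List.pyGetD ((List.range nodes.length).map (pvTF cm ed nodes)) ((j : Int)) "" = _
    rw [PySem.List.pyGetD_natCast, PySem.List.getD_map_range _ _ _ _ (hseg j hj)]
  have hhead : PySem.List.pyGetD ((List.range nodes.length).map (pvHF cm ed nodes)) (i : Int) ""
      = pvHF cm ed nodes i := by
    rw [PySem.List.pyGetD_natCast, PySem.List.getD_map_range _ _ _ _ hi]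
  unfold pvPieceF
  rw [hvs, hbody, hhead, PySem.List.pyGetD_natCast]

lemma pvMRot_eq_pvRotAsm (cm : PySem.Dict String (String × String))
    (ed : PySem.Dict (String × String) (String × (Int × Int) × String))
    (nodes : List String) (ref_size : Int) (i : Nat)
    (hN : 2 ≤ nodes.length) (hi : i < nodes.length)
    (hv : ∀ j, j < nodes.length →
      pvOF ed nodes j = "+" ∨ pvOF ed nodes j = "-" ∨ pvOF ed nodes j = "*") :
    pvMRot cm ed ref_size (nodes.drop i ++ nodes.take i)
      = pvRotAsm nodes (PySem.List.len nodes) (pvEdgeArrays cm ed nodes).1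
          (pvEdgeArrays cm ed nodes).2.1 (pvEdgeArrays cm ed nodes).2.2
          (pvBrk (pvEdgeArrays cm ed nodes).1) ref_size (i : Int) := by
  obtain ⟨closed, ids, parts, hM, hne, heq⟩ :=
    pvInv cm ed nodes i hN hi hv (nodes.length - 1) (by omega)
  -- LHS: the segment machine over the rotation list, via pvInv
  simp only [pvMRot]
  rw [pvPairs_eq nodes i hi]
  have hr0 : PySem.List.pyGetD (nodes.drop i ++ nodes.take i) 0 "" = nodes.getD i "" := by
    rw [PySem.List.pyGetD_zero]
    have h := pvRotGetD nodes i 0 hi (by omega)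
    simpa [Nat.mod_eq_of_lt hi] using h
  rw [hr0, List.foldl_map]
  rw [show (List.range (nodes.length - 1)).foldl
      (fun (s : pvMState) (k : Nat) =>
        pvMStep cm ed s (nodes.getD ((i + k) % nodes.length) "",
                         nodes.getD ((i + k + 1) % nodes.length) ""))
      ([], [nodes.getD i ""], [], "", false) = pvMFold cm ed nodes i (nodes.length - 1) from rfl]
  rw [hM]
  rw [List.map_map]
  have horients : (List.range (nodes.length - 1)).map
        ((fun p : String × String => (pvEdge ed p.1 p.2).2.2) ∘
          (fun k => (nodes.getD ((i + k) % nodes.length) "",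
                     nodes.getD ((i + k + 1) % nodes.length) "")))
      = (List.range (nodes.length - 1)).map (fun k => pvOF ed nodes ((i + k) % nodes.length)) := by
    apply List.map_congr_left
    intro k _
    show (pvEdge ed (nodes.getD ((i + k) % nodes.length) "")
        (nodes.getD ((i + k + 1) % nodes.length) "")).2.2 = _
    unfold pvOF pvEF
    rw [Nat.mod_add_mod]
  rw [horients]
  -- RHS: the precomputed-array assembly
  simp only [pvRotAsm, PySem.List.len_eq, pvEdgeArrays_eq cm ed nodes hN]
  have hidx : (PySem.List.pyRange 0 ((nodes.length : Int) - 1)).map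
        (fun k => PySem.Int.mod ((i : Int) + k) (nodes.length : Int))
      = (List.range (nodes.length - 1)).map (fun k => (((i + k) % nodes.length : Nat) : Int)) := by
    have h1 : ((nodes.length : Int) - 1) = ((nodes.length - 1 : Nat) : Int) := by omega
    rw [h1, PySem.List.pyRange_zero_natCast, List.map_map]
    apply List.map_congr_left
    intro k _
    show PySem.Int.mod ((i : Int) + (k : Int)) (nodes.length : Int) = _
    rw [← Nat.cast_add, PySem.Int.mod_natCast]
  rw [hidx]
  rw [pvSegsI ed nodes i hN (nodes.length - 1)]
  rw [pvPiecesI cm ed nodes i hi (pvSegsN ed nodes i (nodes.length - 1))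
    (pvSegsN_bound ed nodes i (by omega) (nodes.length - 1))]
  rw [← heq]
  rw [if_neg (show ¬ (List.map (fun c => (pvJoin c.1, pvJoin c.2)) closed
      ++ [(pvJoin ids, pvJoin parts)] = []) by simp)]
  rw [PySem.List.slice_to_neg_one, List.dropLast_concat]
  rw [List.foldl_map]
  rw [show (List.foldl (fun (cd : PySem.Dict String String × Int) (seg : List String × List String) =>
        ((cd.1.insert (pvJoin seg.1) (pvJoin seg.2), cd.2 - PySem.Str.len (pvJoin seg.2)) :
          PySem.Dict String String × Int))
      (PySem.Dict.empty, ref_size) closed) = pvP2 ref_size closed from rfl]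
  rw [PySem.List.pyGetD_neg_one_append_singleton]
  have horients2 : ((List.range (nodes.length - 1)).map
        (fun k => (((i + k) % nodes.length : Nat) : Int))).map
          (fun j => PySem.List.pyGetD ((List.range nodes.length).map (pvOF ed nodes)) j "")
      = (List.range (nodes.length - 1)).map (fun k => pvOF ed nodes ((i + k) % nodes.length)) := by
    rw [List.map_map]
    apply List.map_congr_left
    intro k _
    show PySem.List.pyGetD ((List.range nodes.length).map (pvOF ed nodes))
        ((((i + k) % nodes.length : Nat)) : Int) "" = _
    rw [PySem.List.pyGetD_natCast,
      PySem.List.getD_map_range _ _ _ _ (Nat.mod_lt _ (by omega))]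
  rw [horients2]
  by_cases hct : (pvP2 ref_size closed).1.contains (pvJoin ids) = true
  · simp [hct]
  · have hct2 : (pvP2 ref_size closed).1.contains (pvJoin ids) = false := by simpa using hct
    simp [hct2]

lemma pvRot_single (cm : PySem.Dict String (String × String))
    (ed : PySem.Dict (String × String) (String × (Int × Int) × String))
    (ref_size : Int) (x : String) :
    pvARot cm ed ref_size [x]
      = pvRotAsm [x] (PySem.List.len [x]) (pvEdgeArrays cm ed [x]).1
          (pvEdgeArrays cm ed [x]).2.1 (pvEdgeArrays cm ed [x]).2.2
          (pvBrk (pvEdgeArrays cm ed [x]).1) ref_size 0 := by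
  simp [pvARot, pvALoop, pvRotAsm, pvEdgeArrays, pvBrk, pvJoin_nil,
    PySem.List.pyGetD_zero_cons, PySem.List.slice_to_neg_one, PySem.Dict.contains,
    PySem.Dict.empty, PySem.Str.len_eq, PySem.List.pyGetD_neg_one]

-- ===== VERDICT (by name: the statement is the Claim_ definition above) =====
theorem get_assembly_for_all_rotations_of_a_cycle_spec : Claim_equal_get_assembly_for_all_rotations_of_a_cycle := by
  intro contig_map ref_size cycle edges _ hpre
  obtain ⟨hlen2, hrest⟩ := hpre
  unfold Spec_get_assembly_for_all_rotations_of_a_cycle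
  unfold get_assembly_for_all_rotations_of_a_cycle get_assembly_for_all_rotations_of_a_cycle_alt
  simp only []
  rw [pvRots_eq cycle]
  have hLlen : (PySem.List.slice cycle none (some (-1))).length = cycle.length - 1 := by
    rw [PySem.List.slice_to_neg_one]
    simp
  have hL1 : 1 ≤ (PySem.List.slice cycle none (some (-1))).length := by omega
  have hper : ∀ iI ∈ PySem.List.pyRange 0
      (max 1 (PySem.List.len (PySem.List.slice cycle none (some (-1))))),
      pvARot (pvCmDict contig_map) (pvEdgeDict edges) ref_size
        (PySem.List.slice (PySem.List.slice cycle none (some (-1))) (some iI) none ++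
         PySem.List.slice (PySem.List.slice cycle none (some (-1))) none (some iI))
      = pvRotAsm (PySem.List.slice cycle none (some (-1)))
          (PySem.List.len (PySem.List.slice cycle none (some (-1))))
          (pvEdgeArrays (pvCmDict contig_map) (pvEdgeDict edges) (PySem.List.slice cycle none (some (-1)))).1
          (pvEdgeArrays (pvCmDict contig_map) (pvEdgeDict edges) (PySem.List.slice cycle none (some (-1)))).2.1
          (pvEdgeArrays (pvCmDict contig_map) (pvEdgeDict edges) (PySem.List.slice cycle none (some (-1)))).2.2
          (pvBrk (pvEdgeArrays (pvCmDict contig_map) (pvEdgeDict edges) (PySem.List.slice cycle none (some (-1)))).1)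
          ref_size iI := by
    set L := PySem.List.slice cycle none (some (-1)) with hLdef
    intro iI hiI
    rw [PySem.List.mem_pyRange_one] at hiI
    obtain ⟨hi0, hiub⟩ := hiI
    lift iI to Nat using hi0 with iN
    rcases lt_or_ge L.length 2 with hsmall | hbig
    · have h1 : L.length = 1 := by omega
      obtain ⟨x, hx⟩ := List.length_eq_one_iff.mp h1
      have hmax : max 1 (PySem.List.len L) = 1 := by
        rw [PySem.List.len_eq, h1]
        rfl
      rw [hmax] at hiub
      have hi00 : iN = 0 := by omega
      subst hi00
      rw [hx]
      rw [show ((0 : Nat) : Int) = (0 : Int) from rfl]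
      rw [PySem.List.slice_zero_start, PySem.List.slice_none_none, pvSlice_to_zero,
        List.append_nil]
      exact pvRot_single _ _ ref_size x
    · have hvv : ∀ j, j < L.length →
          pvOF (pvEdgeDict edges) L j = "+" ∨ pvOF (pvEdgeDict edges) L j = "-" ∨
          pvOF (pvEdgeDict edges) L j = "*" := by
        intro j hj
        rcases hrest with habs | ⟨hedge, _⟩
        · omega
        obtain ⟨e, hge, hval⟩ := hedge j hj
        have he : pvOF (pvEdgeDict edges) L j = e.2.2 := by
          unfold pvOF pvEF pvEdge
          rw [hge]
          rfl
        rw [he]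
        exact hval
      have hmax : max 1 (PySem.List.len L) = (L.length : Int) := by
        rw [PySem.List.len_eq]
        omega
      rw [hmax] at hiub
      have hiN : iN < L.length := by exact_mod_cast hiub
      rw [PySem.List.slice_from_natCast, PySem.List.slice_to_natCast]
      rw [pvARot_eq_pvMRot]
      exact pvMRot_eq_pvRotAsm (pvCmDict contig_map) (pvEdgeDict edges) L ref_size iN hbig hiN hvv
  rw [PySem.List.foldl_prod_mk
    (f := fun acc r => acc ++ [((pvARot (pvCmDict contig_map) (pvEdgeDict edges) ref_size r).1.items,
      (pvARot (pvCmDict contig_map) (pvEdgeDict edges) ref_size r).2.1,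
      (pvARot (pvCmDict contig_map) (pvEdgeDict edges) ref_size r).2.2)])
    (g := fun acc r => acc ++ [(pvARot (pvCmDict contig_map) (pvEdgeDict edges) ref_size r).1.keys])]
  have hlenrot : PySem.List.len ((PySem.List.pyRange 0
        (max 1 (PySem.List.len (PySem.List.slice cycle none (some (-1)))))).map
      (fun i => PySem.List.slice (PySem.List.slice cycle none (some (-1))) (some i) none ++
        PySem.List.slice (PySem.List.slice cycle none (some (-1))) none (some i)))
      = max 1 (PySem.List.len (PySem.List.slice cycle none (some (-1)))) := by
    rw [PySem.List.len_eq]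
    rw [List.length_map, PySem.List.length_pyRange_one]
    have : (0 : Int) ≤ max 1 (PySem.List.len (PySem.List.slice cycle none (some (-1)))) := by
      positivity
    omega
  rw [hlenrot]
  rw [PySem.List.foldl_prod_mk
    (f := fun acc i => acc ++ [((pvRotAsm (PySem.List.slice cycle none (some (-1)))
        (PySem.List.len (PySem.List.slice cycle none (some (-1))))
        (pvEdgeArrays (pvCmDict contig_map) (pvEdgeDict edges) (PySem.List.slice cycle none (some (-1)))).1
        (pvEdgeArrays (pvCmDict contig_map) (pvEdgeDict edges) (PySem.List.slice cycle none (some (-1)))).2.1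
        (pvEdgeArrays (pvCmDict contig_map) (pvEdgeDict edges) (PySem.List.slice cycle none (some (-1)))).2.2
        (pvBrk (pvEdgeArrays (pvCmDict contig_map) (pvEdgeDict edges) (PySem.List.slice cycle none (some (-1)))).1)
        ref_size i).1.items,
      (pvRotAsm (PySem.List.slice cycle none (some (-1)))
        (PySem.List.len (PySem.List.slice cycle none (some (-1))))
        (pvEdgeArrays (pvCmDict contig_map) (pvEdgeDict edges) (PySem.List.slice cycle none (some (-1)))).1
        (pvEdgeArrays (pvCmDict contig_map) (pvEdgeDict edges) (PySem.List.slice cycle none (some (-1)))).2.1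
        (pvEdgeArrays (pvCmDict contig_map) (pvEdgeDict edges) (PySem.List.slice cycle none (some (-1)))).2.2
        (pvBrk (pvEdgeArrays (pvCmDict contig_map) (pvEdgeDict edges) (PySem.List.slice cycle none (some (-1)))).1)
        ref_size i).2.1,
      (pvRotAsm (PySem.List.slice cycle none (some (-1)))
        (PySem.List.len (PySem.List.slice cycle none (some (-1))))
        (pvEdgeArrays (pvCmDict contig_map) (pvEdgeDict edges) (PySem.List.slice cycle none (some (-1)))).1
        (pvEdgeArrays (pvCmDict contig_map) (pvEdgeDict edges) (PySem.List.slice cycle none (some (-1)))).2.1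
        (pvEdgeArrays (pvCmDict contig_map) (pvEdgeDict edges) (PySem.List.slice cycle none (some (-1)))).2.2
        (pvBrk (pvEdgeArrays (pvCmDict contig_map) (pvEdgeDict edges) (PySem.List.slice cycle none (some (-1)))).1)
        ref_size i).2.2)])
    (g := fun acc i => acc ++ [(pvRotAsm (PySem.List.slice cycle none (some (-1)))
        (PySem.List.len (PySem.List.slice cycle none (some (-1))))
        (pvEdgeArrays (pvCmDict contig_map) (pvEdgeDict edges) (PySem.List.slice cycle none (some (-1)))).1
        (pvEdgeArrays (pvCmDict contig_map) (pvEdgeDict edges) (PySem.List.slice cycle none (some (-1)))).2.1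
        (pvEdgeArrays (pvCmDict contig_map) (pvEdgeDict edges) (PySem.List.slice cycle none (some (-1)))).2.2
        (pvBrk (pvEdgeArrays (pvCmDict contig_map) (pvEdgeDict edges) (PySem.List.slice cycle none (some (-1)))).1)
        ref_size i).1.keys])]
  simp only [PySem.List.foldl_append_singleton_eq_map, List.nil_append, List.map_map]
  refine Prod.ext ?_ (Prod.ext rfl ?_)
  · simp only []
    apply List.map_congr_left
    intro iI hiI
    rw [Function.comp_apply, hper iI hiI]
  · simp only []
    apply List.map_congr_left
    intro iI hiI
    rw [Function.comp_apply, hper iI hiI]
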